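-- pv_equiv track=rewrite | github.com/francescomucio/tee-as-transformation | tee/parser/output/markdown_report_builder.py | separate_nodes_by_type
-- ===== SOURCE A (Python) =====
-- from typing import Dict, Any, List, Set, Tuple
--
-- def separate_nodes_by_type(
--     all_nodes: List[str], function_names: Set[str]
-- ) -> Tuple[List[str], List[str], List[str]]:
--     """
--     Separate nodes into test, function, and table nodes.
--
--     Args:
--         all_nodes: List of all node names
--         function_names: Set of function names for identification
--
--     Returns:
--         Tuple of (test_nodes, function_nodes, table_nodes)
--     """
--     test_nodes = [node for node in all_nodes if node.startswith("test:")]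
--     function_nodes = [
--         node for node in all_nodes
--         if node in function_names and not node.startswith("test:")
--     ]
--     table_nodes = [
--         node for node in all_nodes
--         if node not in function_names and not node.startswith("test:")
--     ]
--     return test_nodes, function_nodes, table_nodes
-- ===== SOURCE B (Python) =====
-- from typing import List, Set, Tuple
--
-- def separate_nodes_by_type(
--     all_nodes: List[str], function_names: Set[str]
-- ) -> Tuple[List[str], List[str], List[str]]:
--     test_nodes, function_nodes, table_nodes = [], [], []
--     for node in all_nodes:
--         if node.startswith("test:"):
--             test_nodes.append(node)
--         elif node in function_names:
--             function_nodes.append(node)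
--         else:
--             table_nodes.append(node)
--     return test_nodes, function_nodes, table_nodes
-- ===== Notes on version B (the rewrite author's own statement) =====
-- stated objective: alternative
-- what changed: Replaces A's three independent filtering passes over all_nodes with a single classifying loop that appends each node to exactly one of three accumulator lists.
import Mathlib
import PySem

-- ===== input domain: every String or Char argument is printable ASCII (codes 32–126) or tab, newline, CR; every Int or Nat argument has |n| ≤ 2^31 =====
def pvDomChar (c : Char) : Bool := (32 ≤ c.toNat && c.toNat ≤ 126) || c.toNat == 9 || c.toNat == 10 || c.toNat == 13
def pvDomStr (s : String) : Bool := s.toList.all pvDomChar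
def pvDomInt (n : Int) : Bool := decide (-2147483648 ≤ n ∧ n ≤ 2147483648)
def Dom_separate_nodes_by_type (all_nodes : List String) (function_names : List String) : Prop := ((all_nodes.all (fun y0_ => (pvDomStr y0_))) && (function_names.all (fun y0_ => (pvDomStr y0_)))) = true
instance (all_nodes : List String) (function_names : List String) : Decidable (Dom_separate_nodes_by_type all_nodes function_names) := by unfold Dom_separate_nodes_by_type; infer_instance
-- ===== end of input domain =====

-- B replaces A's three filtering passes with one classifying pass (same results, one traversal).
-- ===== PORT A =====
def separate_nodes_by_type (all_nodes : List String) (function_names : List String) : List String × List String × List String :=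
  let test_nodes := all_nodes.filter (fun node => PySem.Str.startswith node "test:")
  let function_nodes := all_nodes.filter (fun node =>
    function_names.contains node && !(PySem.Str.startswith node "test:"))
  let table_nodes := all_nodes.filter (fun node =>
    !(function_names.contains node) && !(PySem.Str.startswith node "test:"))
  (test_nodes, function_nodes, table_nodes)

-- ===== PORT B =====
def separate_nodes_by_type_alt (all_nodes : List String) (function_names : List String) : List String × List String × List String :=
  all_nodes.foldl (fun (acc : List String × List String × List String) node =>
    if PySem.Str.startswith node "test:" then (acc.1 ++ [node], acc.2.1, acc.2.2)
    else if function_names.contains node then (acc.1, acc.2.1 ++ [node], acc.2.2)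
    else (acc.1, acc.2.1, acc.2.2 ++ [node])) ([], [], [])

-- ===== PRECONDITION & SPEC =====
def Spec_separate_nodes_by_type (all_nodes : List String) (function_names : List String) (out : List String × List String × List String) : Prop := out = separate_nodes_by_type_alt all_nodes function_names
instance (all_nodes : List String) (function_names : List String) (out : List String × List String × List String) : Decidable (Spec_separate_nodes_by_type all_nodes function_names out) := by unfold Spec_separate_nodes_by_type; infer_instance

-- ===== CLAIM (what is proved, stated in full; the proofs are below) =====
def Claim_equal_separate_nodes_by_type : Prop := ∀ (all_nodes : List String) (function_names : List String), Dom_separate_nodes_by_type all_nodes function_names → Spec_separate_nodes_by_type all_nodes function_names (separate_nodes_by_type all_nodes function_names)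

-- ===== LEMMAS AND PROOFS =====

-- ===== VERDICT (by name: the statement is the Claim_ definition above) =====
lemma alt_fold_acc (fn : List String) (l : List String) (t f tb : List String) :
    l.foldl (fun (acc : List String × List String × List String) node =>
      if PySem.Str.startswith node "test:" then (acc.1 ++ [node], acc.2.1, acc.2.2)
      else if fn.contains node then (acc.1, acc.2.1 ++ [node], acc.2.2)
      else (acc.1, acc.2.1, acc.2.2 ++ [node])) (t, f, tb) =
    (t ++ l.filter (fun node => PySem.Str.startswith node "test:"),
     f ++ l.filter (fun node => fn.contains node && !(PySem.Str.startswith node "test:")),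
     tb ++ l.filter (fun node => !(fn.contains node) && !(PySem.Str.startswith node "test:"))) := by
  induction l generalizing t f tb with
  | nil => simp
  | cons x xs ih =>
    rw [List.foldl_cons, List.filter_cons, List.filter_cons, List.filter_cons]
    by_cases hs : PySem.Str.startswith x "test:"
    · rw [if_pos hs, ih]
      simp at hs
      simp [hs]
    · by_cases hf : fn.contains x
      · rw [if_neg hs, if_pos hf, ih]
        simp at hs hf
        simp [hs, hf]
      · rw [if_neg hs, if_neg hf, ih]
        simp at hs hf
        simp [hs, hf]

theorem separate_nodes_by_type_spec : Claim_equal_separate_nodes_by_type := by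
  intro all_nodes function_names _
  unfold Spec_separate_nodes_by_type separate_nodes_by_type separate_nodes_by_type_alt
  rw [alt_fold_acc]
  simp
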